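-- pv_equiv track=rewrite | github.com/eliottcassidy2000/math | 04-computation/blackself8_deep.py | has_induced_C5
-- ===== SOURCE A (Python) =====
-- def has_induced_C5(adj_sets, m):
--     for v0 in range(m):
--         for v1 in adj_sets[v0]:
--             if v1 <= v0:
--                 continue
--             for v2 in adj_sets[v1]:
--                 if v2 <= v0 or v2 in adj_sets[v0]:
--                     continue
--                 for v3 in adj_sets[v2]:
--                     if v3 <= v0 or v3 == v1 or v3 in adj_sets[v0] or v3 in adj_sets[v1]:
--                         continue
--                     for v4 in adj_sets[v3]:
--                         if v4 <= v0 or v4 == v1 or v4 == v2: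
--                             continue
--                         if v4 in adj_sets[v0] and v4 not in adj_sets[v1] and v4 not in adj_sets[v2]:
--                             return True, (v0, v1, v2, v3, v4)
--     return False, None
-- ===== SOURCE B (Python) =====
-- def has_induced_C5(adj_sets, m):
--     # Recursive DFS extending a path v0..vk; per-position induced-C5 rules,
--     # first completed cycle (in the same candidate order) is returned.
--     def extend(path):
--         if len(path) == 5:
--             return True, tuple(path)
--         v0 = path[0]
--         closing = len(path) == 4
--         for w in adj_sets[path[-1]]:
--             if w <= v0:
--                 continue
--             if any(w == u or w in adj_sets[u] for u in path[1:-1]):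
--                 continue
--             if len(path) >= 2 and (w in adj_sets[v0]) != closing:
--                 continue
--             res = extend(path + [w])
--             if res[0]:
--                 return res
--         return False, None
--     for v0 in range(m):
--         res = extend([v0])
--         if res[0]:
--             return res
--     return False, None
-- ===== Notes on version B (the rewrite author's own statement) =====
-- stated objective: alternative
-- what changed: Replaces A's four hand-coded nested loops (each with its own transcribed filter) by a single recursive DFS extend(path) over the path length with one uniform per-position rule (w > v0, w distinct and non-adjacent to all interior path vertices, and the adjacency to v0 required exactly when closing the cycle), returning the first completed induced C5 in the same candidate order.
import Mathlib
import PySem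

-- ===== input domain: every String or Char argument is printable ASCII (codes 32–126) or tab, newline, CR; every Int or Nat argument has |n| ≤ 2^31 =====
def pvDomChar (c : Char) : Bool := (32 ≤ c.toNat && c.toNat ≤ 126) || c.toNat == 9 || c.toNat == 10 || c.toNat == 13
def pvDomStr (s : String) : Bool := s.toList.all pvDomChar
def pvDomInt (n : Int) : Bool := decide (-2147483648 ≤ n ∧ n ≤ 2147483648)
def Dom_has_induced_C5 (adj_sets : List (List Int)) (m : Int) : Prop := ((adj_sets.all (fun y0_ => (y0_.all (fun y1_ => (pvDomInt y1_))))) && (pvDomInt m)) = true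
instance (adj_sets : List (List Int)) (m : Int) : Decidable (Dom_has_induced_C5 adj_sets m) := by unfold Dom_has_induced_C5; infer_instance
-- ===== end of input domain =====

-- B replaces A's four hand-written nested loops by one recursive DFS over the path length
-- with a uniform per-position rule (objective: alternative decomposition, same cost).

-- ===== PORT A =====
-- adj_sets[v] (Python indexing; Pre_ guarantees every index actually used is in range,
-- so the [] default is never reached inside Pre_)
def pvIdx (adj : List (List Int)) (v : Int) : List Int := (PySem.List.pyGet? adj v).getD []

-- innermost loop: for v4 in adj_sets[v3]
def aLoop4 (adj : List (List Int)) (v0 v1 v2 v3 : Int) : Option (Int × Int × Int × Int × Int) :=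
  (pvIdx adj v3).findSome? (fun v4 =>
    if v4 ≤ v0 ∨ v4 = v1 ∨ v4 = v2 then none
    else if v4 ∈ pvIdx adj v0 ∧ v4 ∉ pvIdx adj v1 ∧ v4 ∉ pvIdx adj v2 then
      some (v0, v1, v2, v3, v4)
    else none)

-- for v3 in adj_sets[v2]
def aLoop3 (adj : List (List Int)) (v0 v1 v2 : Int) : Option (Int × Int × Int × Int × Int) :=
  (pvIdx adj v2).findSome? (fun v3 =>
    if v3 ≤ v0 ∨ v3 = v1 ∨ v3 ∈ pvIdx adj v0 ∨ v3 ∈ pvIdx adj v1 then none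
    else aLoop4 adj v0 v1 v2 v3)

-- for v2 in adj_sets[v1]
def aLoop2 (adj : List (List Int)) (v0 v1 : Int) : Option (Int × Int × Int × Int × Int) :=
  (pvIdx adj v1).findSome? (fun v2 =>
    if v2 ≤ v0 ∨ v2 ∈ pvIdx adj v0 then none
    else aLoop3 adj v0 v1 v2)

-- for v1 in adj_sets[v0]
def aLoop1 (adj : List (List Int)) (v0 : Int) : Option (Int × Int × Int × Int × Int) :=
  (pvIdx adj v0).findSome? (fun v1 =>
    if v1 ≤ v0 then none
    else aLoop2 adj v0 v1)

def has_induced_C5 (adj_sets : List (List Int)) (m : Int) : Bool × (Option (Int × Int × Int × Int × Int)) :=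
  match (PySem.List.pyRange 0 m 1).findSome? (aLoop1 adj_sets) with
  | some t => (true, some t)
  | none => (false, none)

-- ===== PORT B =====
-- the loop's exit shape: return res as soon as res[0] is truthy, else fall through to (False, None)
def c5First (x : Option (Bool × (Option (Int × Int × Int × Int × Int)))) : Bool × (Option (Int × Int × Int × Int × Int)) :=
  match x with
  | some r => r
  | none => (false, none)

-- extend(path): structural recursion on fuel = 5 - len(path)
def extendC5 (adj : List (List Int)) : Nat → List Int → Bool × (Option (Int × Int × Int × Int × Int))
  | 0, path =>
    -- len(path) == 5: return True, tuple(path)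
    match path with
    | [a, b, c, d, e] => (true, some (a, b, c, d, e))
    | _ => (false, none)
  | k + 1, path =>
    let v0 := path.headD 0
    let closing := path.length == 4
    c5First ((pvIdx adj (path.getLastD 0)).findSome? (fun w =>
      if w ≤ v0 then none
      else if (path.drop 1).dropLast.any (fun u => w == u || decide (w ∈ pvIdx adj u)) then none
      else if decide (2 ≤ path.length) && (decide (w ∈ pvIdx adj v0) != closing) then none
      else
        let res := extendC5 adj k (path ++ [w])
        if res.1 then some res else none))

def has_induced_C5_alt (adj_sets : List (List Int)) (m : Int) : Bool × (Option (Int × Int × Int × Int × Int)) :=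
  c5First ((PySem.List.pyRange 0 m 1).findSome? (fun v0 =>
      let res := extendC5 adj_sets 4 [v0]
      if res.1 then some res else none))

-- ===== PRECONDITION & SPEC =====
-- pvSafe adj d x: x is a harmless neighbour value at remaining descent depth d — either
-- non-positive (the w <= v0 filter keeps it from ever being indexed) or a valid index whose
-- own entries are harmless one level deeper; only 3 descents happen (adj[v1], adj[v2], adj[v3]).
def pvSafe (adj : List (List Int)) : Nat → Int → Bool
  | 0, x => !decide (0 < x) || decide (x < (adj.length : Int))
  | d + 1, x => !decide (0 < x) ||
      (decide (x < (adj.length : Int)) && (adj.getD x.toNat []).all (pvSafe adj d))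

-- Pre_ excludes inputs (with m > 0) where m > len(adj_sets) or where some vertex reachable from
-- a root v0 < m within 3 positive-entry steps is an index >= len(adj_sets): there the traversal's
-- list indexing generally raises IndexError, and the few such inputs that still return do so only
-- because an earlier hit or an induced-non-adjacency filter happens to shield the bad index.
def Pre_has_induced_C5 (adj_sets : List (List Int)) (m : Int) : Prop :=
  m ≤ 0 ∨ (m ≤ (adj_sets.length : Int) ∧
    ∀ l ∈ adj_sets.take m.toNat, ∀ x ∈ l, pvSafe adj_sets 3 x = true)
instance (adj_sets : List (List Int)) (m : Int) : Decidable (Pre_has_induced_C5 adj_sets m) := by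
  unfold Pre_has_induced_C5; infer_instance

def pvWitness_has_induced_C5 : List (List Int) × Int := ([[1, 4], [0, 2], [1, 3], [2, 4], [3, 0]], 5)

def Spec_has_induced_C5 (adj_sets : List (List Int)) (m : Int) (out : Bool × (Option (Int × Int × Int × Int × Int))) : Prop := out = has_induced_C5_alt adj_sets m
instance (adj_sets : List (List Int)) (m : Int) (out : Bool × (Option (Int × Int × Int × Int × Int))) : Decidable (Spec_has_induced_C5 adj_sets m out) := by unfold Spec_has_induced_C5; infer_instance

-- ===== CLAIM (what is proved, stated in full; the proofs are below) =====
def Claim_equal_has_induced_C5 : Prop := ∀ (adj_sets : List (List Int)) (m : Int), Dom_has_induced_C5 adj_sets m → Pre_has_induced_C5 adj_sets m → Spec_has_induced_C5 adj_sets m (has_induced_C5 adj_sets m)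

-- ===== LEMMAS AND PROOFS =====

-- how extend's caller tags a found tuple, and the two shapes of extend's result
def c5Tag (t : Int × Int × Int × Int × Int) : Bool × (Option (Int × Int × Int × Int × Int)) :=
  (true, some t)

def c5Omap (x : Option (Int × Int × Int × Int × Int)) : Bool × (Option (Int × Int × Int × Int × Int)) :=
  match x with
  | some t => (true, some t)
  | none => (false, none)

theorem c5_findSome?_congr {α β : Type} (l : List α) (f g : α → Option β)
    (h : ∀ a ∈ l, f a = g a) : l.findSome? f = l.findSome? g := by
  induction l with
  | nil => rfl
  | cons a l ih =>
    simp only [List.findSome?_cons, h a (List.mem_cons_self)]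
    cases g a with
    | some b => rfl
    | none => exact ih fun x hx => h x (List.mem_cons_of_mem _ hx)

theorem c5_findSome?_map {α β γ : Type} (l : List α) (f : α → Option β) (g : β → γ) :
    l.findSome? (fun a => (f a).map g) = (l.findSome? f).map g := by
  induction l with
  | nil => rfl
  | cons a l ih =>
    simp only [List.findSome?_cons]
    cases f a with
    | some b => rfl
    | none => simpa using ih

theorem c5_wrap_omap (x : Option (Int × Int × Int × Int × Int)) :
    (if (c5Omap x).1 then some (c5Omap x) else none) = x.map c5Tag := by
  cases x <;> rfl

theorem c5First_map (x : Option (Int × Int × Int × Int × Int)) :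
    c5First (x.map c5Tag) = c5Omap x := by
  cases x <;> rfl

theorem extend_eq_a4 (adj : List (List Int)) (v0 v1 v2 v3 : Int) :
    extendC5 adj 1 [v0, v1, v2, v3] = c5Omap (aLoop4 adj v0 v1 v2 v3) := by
  unfold extendC5
  dsimp only
  rw [← c5First_map]
  congr 1
  rw [aLoop4, ← c5_findSome?_map]
  refine c5_findSome?_congr _ _ _ (fun w _ => ?_)
  simp only [List.headD, List.drop, List.dropLast, List.any_cons, List.any_nil,
    List.length_cons, List.length_nil, extendC5, List.cons_append, List.nil_append]
  by_cases h1 : w ≤ v0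
  · simp [h1]
  · by_cases h2 : w = v1 <;> by_cases h3 : w = v2 <;>
      by_cases h4 : w ∈ pvIdx adj v0 <;> by_cases h5 : w ∈ pvIdx adj v1 <;>
      by_cases h6 : w ∈ pvIdx adj v2 <;>
      simp [h1, h2, h3, h4, h5, h6, c5Tag]

theorem extend_eq_a3 (adj : List (List Int)) (v0 v1 v2 : Int) :
    extendC5 adj 2 [v0, v1, v2] = c5Omap (aLoop3 adj v0 v1 v2) := by
  unfold extendC5
  dsimp only
  rw [← c5First_map]
  congr 1
  rw [aLoop3, ← c5_findSome?_map]
  refine c5_findSome?_congr _ _ _ (fun w _ => ?_)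
  simp only [List.headD, List.drop, List.dropLast, List.any_cons, List.any_nil,
    List.length_cons, List.length_nil, List.cons_append, List.nil_append,
    extend_eq_a4, c5_wrap_omap]
  by_cases h1 : w ≤ v0
  · simp [h1]
  · by_cases h2 : w = v1 <;> by_cases h4 : w ∈ pvIdx adj v0 <;>
      by_cases h5 : w ∈ pvIdx adj v1 <;>
      simp [h1, h2, h4, h5]

theorem extend_eq_a2 (adj : List (List Int)) (v0 v1 : Int) :
    extendC5 adj 3 [v0, v1] = c5Omap (aLoop2 adj v0 v1) := by
  unfold extendC5
  dsimp only
  rw [← c5First_map]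
  congr 1
  rw [aLoop2, ← c5_findSome?_map]
  refine c5_findSome?_congr _ _ _ (fun w _ => ?_)
  simp only [List.headD, List.drop, List.dropLast, List.any_nil,
    List.length_cons, List.length_nil, List.cons_append, List.nil_append,
    extend_eq_a3, c5_wrap_omap]
  by_cases h1 : w ≤ v0
  · simp [h1]
  · by_cases h4 : w ∈ pvIdx adj v0 <;>
      simp [h1, h4]

theorem extend_eq_a1 (adj : List (List Int)) (v0 : Int) :
    extendC5 adj 4 [v0] = c5Omap (aLoop1 adj v0) := by
  unfold extendC5
  dsimp only
  rw [← c5First_map]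
  congr 1
  rw [aLoop1, ← c5_findSome?_map]
  refine c5_findSome?_congr _ _ _ (fun w _ => ?_)
  simp only [List.headD, List.drop, List.dropLast, List.any_nil,
    List.length_cons, List.length_nil, List.cons_append, List.nil_append,
    extend_eq_a2, c5_wrap_omap]
  by_cases h1 : w ≤ v0
  · simp [h1]
  · simp [h1]

theorem c5_top_eq (adj : List (List Int)) (m : Int) :
    ((PySem.List.pyRange 0 m 1).findSome? (fun v0 =>
        let res := extendC5 adj 4 [v0]
        if res.1 then some res else none))
      = ((PySem.List.pyRange 0 m 1).findSome? (aLoop1 adj)).map c5Tag := by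
  rw [← c5_findSome?_map]
  refine c5_findSome?_congr _ _ _ (fun v0 _ => ?_)
  simp only [extend_eq_a1, c5_wrap_omap]

-- ===== VERDICT (by name: the statement is the Claim_ definition above) =====
theorem has_induced_C5_spec : Claim_equal_has_induced_C5 := by
  intro adj_sets m _ _
  unfold Spec_has_induced_C5 has_induced_C5 has_induced_C5_alt
  rw [c5_top_eq]
  cases (PySem.List.pyRange 0 m 1).findSome? (aLoop1 adj_sets) <;> rfl
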